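-- pv_equiv track=rewrite | github.com/shengcanxu/Tushare | usstock/parseUSDivident.py | getMoneyFromString
-- ===== SOURCE A (Python) =====
-- def getMoneyFromString(str):
--     moneyStr = ""
--     pos = 0
--     for index in range(0, len(str)):
--         char = str[index]
--         if char.isnumeric() or char == '.':
--             moneyStr += char
--             pos = index
--     currency = str[pos+1:]
--     return (moneyStr, currency)
-- ===== SOURCE B (Python) =====
-- def getMoneyFromString(str):
--     moneyStr = ''.join(c for c in str if c.isnumeric() or c == '.')
--     pos = 0
--     for i in range(len(str) - 1, -1, -1):
--         c = str[i]
--         if c.isnumeric() or c == '.':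
--             pos = i
--             break
--     return (moneyStr, str[pos+1:])
-- ===== Notes on version B (the rewrite author's own statement) =====
-- stated objective: alternative
-- what changed: A's single forward loop threading (moneyStr, pos) together is split into a one-pass filter/join for the money digits and a separate reverse scan with early break that finds the last digit/dot position.
import Mathlib
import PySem

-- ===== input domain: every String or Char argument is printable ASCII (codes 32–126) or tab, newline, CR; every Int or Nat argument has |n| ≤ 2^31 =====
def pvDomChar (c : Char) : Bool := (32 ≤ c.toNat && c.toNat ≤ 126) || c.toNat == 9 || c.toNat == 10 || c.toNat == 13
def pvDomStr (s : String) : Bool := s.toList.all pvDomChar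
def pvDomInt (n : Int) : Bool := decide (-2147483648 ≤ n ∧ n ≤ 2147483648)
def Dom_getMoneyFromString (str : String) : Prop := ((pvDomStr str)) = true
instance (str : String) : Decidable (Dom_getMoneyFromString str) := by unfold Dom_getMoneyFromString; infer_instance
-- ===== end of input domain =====

-- B keeps A's exact return value but decomposes the work differently: a filter pass for
-- the digits plus a reverse scan with early break for the last digit/dot position.
-- (isnumeric is ported as isdigit: they coincide on the ASCII domain Dom.)

-- ===== PORT A =====
-- single forward loop over indices, threading (moneyStr, pos)
def getMoneyFromString (str : String) : String × String :=
  let cs := str.toList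
  let st := (PySem.List.enumerate cs 0).foldl
    (fun (acc : List Char × Int) (p : Int × Char) =>
      if PySem.Chars.isdigit p.2 || p.2 == '.' then (acc.1 ++ [p.2], p.1) else acc)
    ([], 0)
  (String.ofList st.1, String.ofList (PySem.List.slice cs (some (st.2 + 1)) none))

-- ===== PORT B =====
-- reverse index scan with early break (the `break` is the non-recursive branch)
def pvFindLastB (cs : List Char) : List Int → Nat
  | [] => 0
  | i :: rest =>
    let c := PySem.List.pyGetD cs i ' '
    if PySem.Chars.isdigit c || c == '.' then i.toNat else pvFindLastB cs rest

def getMoneyFromString_alt (str : String) : String × String :=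
  let cs := str.toList
  let money := cs.filter (fun c => PySem.Chars.isdigit c || c == '.')
  let pos := pvFindLastB cs (PySem.List.pyRange ((cs.length : Int) - 1) (-1) (-1))
  (String.ofList money, String.ofList (PySem.List.slice cs (some ((pos : Int) + 1)) none))

-- ===== PRECONDITION & SPEC =====
def Spec_getMoneyFromString (str : String) (out : String × String) : Prop := out = getMoneyFromString_alt str
instance (str : String) (out : String × String) : Decidable (Spec_getMoneyFromString str out) := by unfold Spec_getMoneyFromString; infer_instance

-- ===== CLAIM (what is proved, stated in full; the proofs are below) =====
def Claim_equal_getMoneyFromString : Prop := ∀ (str : String), Dom_getMoneyFromString str → Spec_getMoneyFromString str (getMoneyFromString str)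

-- ===== LEMMAS AND PROOFS =====

-- reference: last index (offset by i) of a digit/dot char, default acc
def pvLastMatch (cs : List Char) (i acc : Nat) : Nat :=
  match cs with
  | [] => acc
  | c :: t => pvLastMatch t (i + 1) (if PySem.Chars.isdigit c || c == '.' then i else acc)

theorem pvFoldA_eq (cs : List Char) (s acc : Nat) (m : List Char) :
    (PySem.List.enumerate cs (s : Int)).foldl
      (fun (a : List Char × Int) (p : Int × Char) =>
        if PySem.Chars.isdigit p.2 || p.2 == '.' then (a.1 ++ [p.2], p.1) else a)
      (m, (acc : Int))
    = (m ++ cs.filter (fun c => PySem.Chars.isdigit c || c == '.'),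
       ((pvLastMatch cs s acc : Nat) : Int)) := by
  induction cs generalizing s acc m with
  | nil => simp [pvLastMatch]
  | cons c t ih =>
    rw [PySem.List.enumerate_cons]
    simp only [List.foldl_cons, List.filter_cons, pvLastMatch]
    by_cases h : (PySem.Chars.isdigit c || c == '.') = true
    · simp only [h]
      have : ((s : Int)) = ((s : Nat) : Int) := rfl
      have := ih (s + 1) s (m ++ [c])
      push_cast at this ⊢
      simpa [h] using this
    · simp only [h]
      have := ih (s + 1) acc m
      push_cast at this ⊢
      simpa [h] using this

theorem pvLastMatch_append (xs : List Char) (c : Char) (i acc : Nat) :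
    pvLastMatch (xs ++ [c]) i acc
      = (if PySem.Chars.isdigit c || c == '.' then i + xs.length else pvLastMatch xs i acc) := by
  induction xs generalizing i acc with
  | nil => simp [pvLastMatch]
  | cons x t ih =>
    simp only [List.cons_append, pvLastMatch, ih]
    split_ifs <;> simp [Nat.add_assoc, Nat.add_comm 1]

theorem pvFindB_eq (cs : List Char) (k : Nat) (hk : k ≤ cs.length) :
    pvFindLastB cs (PySem.List.pyRange ((k : Int) - 1) (-1) (-1))
      = pvLastMatch (cs.take k) 0 0 := by
  induction k with
  | zero =>
    rw [PySem.List.pyRange_neg_one_eq_nil (by norm_num)]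
    simp [pvFindLastB, pvLastMatch]
  | succ k ih =>
    have hk' : k < cs.length := by omega
    rw [show ((k + 1 : Nat) : Int) - 1 = (k : Int) by push_cast; ring]
    rw [PySem.List.pyRange_neg_one_cons (by omega)]
    · simp only [pvFindLastB]
      have hget : PySem.List.pyGetD cs ((k : Int)) ' ' = cs[k] :=
        PySem.List.pyGetD_ofNat cs k ' ' hk'
      rw [hget]
      have htake : cs.take (k + 1) = cs.take k ++ [cs[k]] := by
        rw [← List.concat_eq_append, List.take_concat_get]
      rw [htake, pvLastMatch_append]
      have hlen : (cs.take k).length = k := by simp [Nat.min_eq_left (le_of_lt hk')]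
      rw [hlen]
      rw [ih (le_of_lt hk')]
      simp

-- ===== VERDICT (by name: the statement is the Claim_ definition above) =====
theorem getMoneyFromString_spec : Claim_equal_getMoneyFromString := by
  intro str _
  unfold Spec_getMoneyFromString getMoneyFromString getMoneyFromString_alt
  set cs := str.toList with hcs
  have hA := pvFoldA_eq cs 0 0 []
  have hB := pvFindB_eq cs cs.length (le_refl _)
  simp only [Nat.cast_zero] at hA
  simp only [hA, hB, List.take_length, List.nil_append]
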